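-- pv_equiv track=rewrite | github.com/yuinaz/discord-bot-railway | satpambot/bot/modules/discord_bot/cogs/a08_ladder_runtime_autorank_overlay.py | _phase_for_total
-- ===== SOURCE A (Python) =====
-- from typing import Dict, Any, List, Tuple, Optional
--
-- def _phase_for_total(total: int, kuliah_q: List[int], magang_q: int, work_q: List[int]) -> Tuple[str,int,int,int]:
--     """
--     Returns (phase_label, stage_index, prev_sum, required)
--     - phase_label: 'KULIAH' or 'MAGANG' or 'WORK' or 'GOVERNOR'
--     - stage_index: 1-based index within phase (for label), or 1 for MAGANG
--     - prev_sum: cumulative sum at start of current stage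
--     - required: quota required to finish the current stage
--     """
--     # KULIAH ranges
--     cum = 0
--     for i, q in enumerate(kuliah_q, start=1):
--         nxt = cum + q
--         if total < nxt:
--             return "KULIAH", i, cum, q
--         cum = nxt
--     # MAGANG
--     mag_start = cum
--     if total < mag_start + magang_q:
--         return "MAGANG", 1, mag_start, magang_q
--     # WORK overall
--     cum2 = mag_start + magang_q
--     for i, q in enumerate(work_q, start=1):
--         nxt = cum2 + q
--         if total < nxt:
--             return "WORK", i, cum2, q
--         cum2 = nxt
--     # Beyond all -> GOVERNOR (show last WORK L as 100% and label GOVERNOR)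
--     return "GOVERNOR", 1, cum2, 1
-- ===== SOURCE B (Python) =====
-- from typing import List, Tuple
--
-- def _phase_for_total(total: int, kuliah_q: List[int], magang_q: int, work_q: List[int]) -> Tuple[str,int,int,int]:
--     # Precompute the boundary (prefix-sum) array, locate the first boundary that
--     # exceeds total by index search, and derive the phase label and 1-based index
--     # arithmetically from that position.
--     quotas = kuliah_q + [magang_q] + work_q
--     P = [0]
--     for q in quotas:
--         P.append(P[-1] + q)
--     i = next((j for j in range(len(quotas)) if total < P[j + 1]), None)
--     if i is None:
--         return "GOVERNOR", 1, P[-1], 1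
--     prev, q = P[i], quotas[i]
--     nk = len(kuliah_q)
--     if i < nk:
--         return "KULIAH", i + 1, prev, q
--     if i == nk:
--         return "MAGANG", 1, prev, q
--     return "WORK", i - nk, prev, q
-- ===== Notes on version B (the rewrite author's own statement) =====
-- stated objective: alternative
-- what changed: Instead of three labeled running-sum loops with inline early returns, B precomputes the full prefix-sum boundary array, locates the first boundary exceeding total by index search, and derives the phase label, 1-based stage index and prev sum arithmetically from that global position.
import Mathlib
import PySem

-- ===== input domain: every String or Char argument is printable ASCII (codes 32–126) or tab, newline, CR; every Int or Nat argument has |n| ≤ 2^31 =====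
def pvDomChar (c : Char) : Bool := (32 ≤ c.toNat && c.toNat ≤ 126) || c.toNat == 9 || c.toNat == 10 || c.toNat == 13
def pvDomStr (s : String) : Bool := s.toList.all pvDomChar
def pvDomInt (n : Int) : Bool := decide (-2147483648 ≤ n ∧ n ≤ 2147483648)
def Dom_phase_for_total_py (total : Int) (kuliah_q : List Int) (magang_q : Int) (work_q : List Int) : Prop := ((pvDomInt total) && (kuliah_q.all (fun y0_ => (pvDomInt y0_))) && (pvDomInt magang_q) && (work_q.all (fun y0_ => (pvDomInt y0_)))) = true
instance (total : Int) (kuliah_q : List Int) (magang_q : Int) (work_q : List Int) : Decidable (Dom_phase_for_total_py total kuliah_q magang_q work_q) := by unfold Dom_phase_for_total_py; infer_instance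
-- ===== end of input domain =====

-- B replaces A's three labeled running-sum loops by a precomputed prefix-sum boundary array,
-- an index search for the first boundary exceeding total, and arithmetic on the found position
-- to derive the phase label/index (objective: alternative).

-- ===== PORT A =====
-- A's WORK loop: for i, q in enumerate(work_q, start=1) with running cum2
def pyWorkLoop (total : Int) (cum2 : Int) (i : Int) : List Int → String × Int × Int × Int
  | [] => ("GOVERNOR", 1, cum2, 1)
  | q :: rest =>
    if total < cum2 + q then ("WORK", i, cum2, q)
    else pyWorkLoop total (cum2 + q) (i + 1) rest

-- A's KULIAH loop; when exhausted, the MAGANG check, then the WORK loop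
def pyKuliahLoop (total : Int) (magang_q : Int) (work_q : List Int) (cum : Int) (i : Int) : List Int → String × Int × Int × Int
  | [] =>
    if total < cum + magang_q then ("MAGANG", 1, cum, magang_q)
    else pyWorkLoop total (cum + magang_q) 1 work_q
  | q :: rest =>
    if total < cum + q then ("KULIAH", i, cum, q)
    else pyKuliahLoop total magang_q work_q (cum + q) (i + 1) rest

def phase_for_total_py (total : Int) (kuliah_q : List Int) (magang_q : Int) (work_q : List Int) : String × Int × Int × Int :=
  pyKuliahLoop total magang_q work_q 0 1 kuliah_q

-- ===== PORT B =====
-- B's `for q in quotas: P.append(P[-1] + q)`: the successive boundaries P[1..]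
def bounds (prev : Int) : List Int → List Int
  | [] => []
  | q :: rest => (prev + q) :: bounds (prev + q) rest

-- B's `next((j for j in range(len(quotas)) if total < P[j+1]), None)`
def firstIdx (total : Int) : List Int → Option Nat
  | [] => none
  | b :: rest => if total < b then some 0 else (firstIdx total rest).map (· + 1)

def phase_for_total_py_alt (total : Int) (kuliah_q : List Int) (magang_q : Int) (work_q : List Int) : String × Int × Int × Int :=
  let quotas := kuliah_q ++ [magang_q] ++ work_q
  let P := (0 : Int) :: bounds 0 quotas     -- P = [0]; for q in quotas: P.append(P[-1]+q)
  match firstIdx total (bounds 0 quotas) with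
  | none => ("GOVERNOR", 1, P.getLastD 0, 1)      -- P[-1]
  | some i =>
    let prev := P.getD i 0                        -- P[i] (i in range; getD exact there)
    let q := quotas.getD i 0                      -- quotas[i]
    let nk := kuliah_q.length
    if i < nk then ("KULIAH", (i : Int) + 1, prev, q)
    else if i = nk then ("MAGANG", 1, prev, q)
    else ("WORK", (i : Int) - (nk : Int), prev, q)

-- ===== PRECONDITION & SPEC =====
def Spec_phase_for_total_py (total : Int) (kuliah_q : List Int) (magang_q : Int) (work_q : List Int) (out : String × Int × Int × Int) : Prop := out = phase_for_total_py_alt total kuliah_q magang_q work_q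
instance (total : Int) (kuliah_q : List Int) (magang_q : Int) (work_q : List Int) (out : String × Int × Int × Int) : Decidable (Spec_phase_for_total_py total kuliah_q magang_q work_q out) := by unfold Spec_phase_for_total_py; infer_instance

-- ===== CLAIM (what is proved, stated in full; the proofs are below) =====
def Claim_equal_phase_for_total_py : Prop := ∀ (total : Int) (kuliah_q : List Int) (magang_q : Int) (work_q : List Int), Dom_phase_for_total_py total kuliah_q magang_q work_q → Spec_phase_for_total_py total kuliah_q magang_q work_q (phase_for_total_py total kuliah_q magang_q work_q)

-- ===== LEMMAS AND PROOFS =====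
-- proof-side abstraction: the first stage (local index, prev sum, quota) not yet completed
def scan2 (total prev : Int) : List Int → Option (Nat × Int × Int)
  | [] => none
  | q :: rest =>
    if total < prev + q then some (0, prev, q)
    else (scan2 total (prev + q) rest).map (fun r => (r.1 + 1, r.2.1, r.2.2))

lemma scan2_lt_length (total : Int) : ∀ (qs : List Int) (prev : Int) (r : Nat × Int × Int),
    scan2 total prev qs = some r → r.1 < qs.length := by
  intro qs
  induction qs with
  | nil => intro prev r h; simp [scan2] at h
  | cons q rest ih =>
    intro prev r h
    simp only [scan2] at h
    split_ifs at h with hlt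
    · cases h; simp
    · rcases Option.map_eq_some_iff.mp h with ⟨r', hr', rfl⟩
      have := ih (prev + q) r' hr'
      simpa using Nat.succ_lt_succ this

lemma scan2_append (total : Int) : ∀ (xs ys : List Int) (prev : Int),
    scan2 total prev (xs ++ ys) =
      match scan2 total prev xs with
      | some r => some r
      | none => (scan2 total (prev + xs.sum) ys).map (fun r => (r.1 + xs.length, r.2.1, r.2.2)) := by
  intro xs
  induction xs with
  | nil => intro ys prev; simp [scan2]
  | cons q rest ih =>
    intro ys prev
    simp only [List.cons_append, scan2]
    split_ifs with hlt
    · rfl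
    · rw [ih ys (prev + q)]
      cases hs : scan2 total (prev + q) rest with
      | some r => simp
      | none =>
        simp only [Option.map_map, List.sum_cons, List.length_cons]
        rw [show prev + (q + rest.sum) = prev + q + rest.sum from by ring]
        congr 1

-- B's index search + lookups agree with scan2
lemma firstIdx_scan2 (total : Int) : ∀ (qs : List Int) (prev : Int),
    (match scan2 total prev qs with
     | none => firstIdx total (bounds prev qs) = none ∧
               (prev :: bounds prev qs).getLastD 0 = prev + qs.sum
     | some r => firstIdx total (bounds prev qs) = some r.1 ∧
                 (prev :: bounds prev qs).getD r.1 0 = r.2.1 ∧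
                 qs.getD r.1 0 = r.2.2) := by
  intro qs
  induction qs with
  | nil => intro prev; simp [scan2, bounds, firstIdx]
  | cons q rest ih =>
    intro prev
    simp only [scan2, bounds, firstIdx]
    split_ifs with hlt
    · simp
    · have := ih (prev + q)
      cases hs : scan2 total (prev + q) rest with
      | none =>
        rw [hs] at this
        refine ⟨by simp [this.1], ?_⟩
        have h2 := this.2
        cases hb : bounds (prev + q) rest with
        | nil => simp [hb] at h2 ⊢; omega
        | cons b bs =>
          rw [hb] at h2
          simp only [List.getLastD_cons, List.sum_cons] at h2 ⊢
          rw [List.getLastD_eq_getLast?] at h2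
          rw [List.getLastD_eq_getLast?, h2]; ring
      | some r =>
        rw [hs] at this
        refine ⟨by simp [this.1], ?_, ?_⟩
        · simpa using this.2.1
        · simpa using this.2.2

-- A's WORK loop via scan2
lemma work_scan2 (total : Int) : ∀ (qs : List Int) (cum i : Int),
    pyWorkLoop total cum i qs =
      match scan2 total cum qs with
      | none => ("GOVERNOR", 1, cum + qs.sum, 1)
      | some r => ("WORK", i + r.1, r.2.1, r.2.2) := by
  intro qs
  induction qs with
  | nil => intro cum i; simp [pyWorkLoop, scan2]
  | cons q rest ih =>
    intro cum i
    simp only [pyWorkLoop, scan2]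
    split_ifs with hlt
    · simp
    · rw [ih (cum + q) (i + 1)]
      cases hs : scan2 total (cum + q) rest with
      | none => simp; ring
      | some r => simp; ring

-- A's KULIAH loop via scan2
lemma kuliah_scan2 (total magang_q : Int) (work_q : List Int) : ∀ (qs : List Int) (cum i : Int),
    pyKuliahLoop total magang_q work_q cum i qs =
      match scan2 total cum qs with
      | none =>
        if total < cum + qs.sum + magang_q then ("MAGANG", 1, cum + qs.sum, magang_q)
        else pyWorkLoop total (cum + qs.sum + magang_q) 1 work_q
      | some r => ("KULIAH", i + r.1, r.2.1, r.2.2) := by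
  intro qs
  induction qs with
  | nil => intro cum i; simp [pyKuliahLoop, scan2]
  | cons q rest ih =>
    intro cum i
    simp only [pyKuliahLoop, scan2]
    by_cases hlt : total < cum + q
    · simp [hlt]
    · simp only [if_neg hlt]
      rw [ih (cum + q) (i + 1)]
      cases hs : scan2 total (cum + q) rest with
      | none =>
        simp only [Option.map_none]
        have hsum : cum + q + rest.sum = cum + (q :: rest).sum := by
          simp only [List.sum_cons]; ring
        rw [hsum]
      | some r => simp; ring

-- ===== VERDICT (by name: the statement is the Claim_ definition above) =====
theorem phase_for_total_py_spec : Claim_equal_phase_for_total_py := by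
  intro total kuliah_q magang_q work_q _
  simp only [Spec_phase_for_total_py, phase_for_total_py, phase_for_total_py_alt]
  have hB := firstIdx_scan2 total (kuliah_q ++ [magang_q] ++ work_q) 0
  rw [kuliah_scan2 total magang_q work_q kuliah_q 0 1]
  simp only [zero_add]
  rw [scan2_append total (kuliah_q ++ [magang_q]) work_q 0,
      scan2_append total kuliah_q [magang_q] 0] at hB
  simp only [scan2, List.sum_append, List.sum_cons, List.sum_nil, add_zero,
             List.length_append, List.length_cons, List.length_nil, zero_add] at hB
  simp only [List.append_assoc, List.cons_append, List.nil_append] at hB ⊢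
  cases hk : scan2 total 0 kuliah_q with
  | some r =>
    have hlen := scan2_lt_length total kuliah_q 0 r hk
    rw [hk] at hB
    simp only at hB
    rw [hB.1]
    simp only [hB.2.1, hB.2.2, if_pos hlen]
    simp [add_comm]
  | none =>
    rw [hk] at hB
    simp only [Option.map_none] at hB
    by_cases hm : total < kuliah_q.sum + magang_q
    · -- MAGANG
      rw [if_pos hm] at hB ⊢
      simp only [Option.map_some, Nat.zero_add] at hB
      rw [hB.1]
      simp only [hB.2.1, hB.2.2]
      simp only [lt_irrefl, if_false, if_true]
    · -- WORK / GOVERNOR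
      rw [if_neg hm] at hB ⊢
      simp only [Option.map_none] at hB
      rw [work_scan2 total work_q (kuliah_q.sum + magang_q) 1]
      cases hw : scan2 total (kuliah_q.sum + magang_q) work_q with
      | none =>
        rw [hw] at hB
        simp only [Option.map_none] at hB
        rw [hB.1, hB.2]
      | some r =>
        rw [hw] at hB
        simp only [Option.map_some] at hB
        rw [hB.1]
        have h1 : ¬ (r.1 + (kuliah_q.length + 1) < kuliah_q.length) := by omega
        have h2 : ¬ (r.1 + (kuliah_q.length + 1) = kuliah_q.length) := by omega
        simp only [hB.2.1, hB.2.2, if_neg h1, if_neg h2]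
        have hidx : (1 : Int) + r.1 = (↑(r.1 + (kuliah_q.length + 1)) : Int) - ↑kuliah_q.length := by
          push_cast; ring
        rw [hidx]
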